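-- pv_equiv track=rewrite | github.com/sympy/sympy | sympy/logic/boolalg.py | _rem_redundancy
-- ===== SOURCE A (Python) =====
-- def _compare_term(minterm, term):
--     """
--     Return True if a binary term is satisfied by the given term. Used
--     for recognizing prime implicants.
--     """
--     for i, x in enumerate(term):
--         if x != 3 and x != minterm[i]:
--             return False
--     return True
--
-- def _rem_redundancy(l1, terms):
--     """
--     After the truth table has been sufficiently simplified, use the prime
--     implicant table method to recognize and eliminate redundant pairs,
--     and return the essential arguments.
--     """
--     essential = []
--     for x in terms:
--         temporary = []
--         for y in l1:
--             if _compare_term(x, y):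
--                 temporary.append(y)
--         if len(temporary) == 1:
--             if temporary[0] not in essential:
--                 essential.append(temporary[0])
--     for x in terms:
--         for y in essential:
--             if _compare_term(x, y):
--                 break
--         else:
--             for z in l1:
--                 if _compare_term(x, z):
--                     if z not in essential:
--                         essential.append(z)
--                     break
--
--     return essential
-- ===== SOURCE B (Python) =====
-- def _compare_term(minterm, term):
--     for i, x in enumerate(term):
--         if x != 3 and x != minterm[i]:
--             return False
--     return True
--
-- def _rem_redundancy(l1, terms):
--     essential = []
--     # Phase 1: streaming unique-cover detection per term, with early exit as
--     # soon as a second covering implicant shows up (no cover list is built).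
--     for x in terms:
--         only = None
--         for y in l1:
--             if _compare_term(x, y):
--                 if only is None:
--                     only = y
--                 else:
--                     only = None
--                     break
--         if only is not None and only not in essential:
--             essential.append(only)
--     # Phase 2: worklist of still-uncovered terms; whenever an implicant is
--     # chosen, every term it covers leaves the worklist at once, so no test
--     # against the growing essential list is ever needed again.
--     pending = [x for x in terms if not any(_compare_term(x, y) for y in essential)]
--     while pending:
--         x = pending.pop(0)
--         for z in l1:
--             if _compare_term(x, z):
--                 essential.append(z)
--                 pending = [t for t in pending if not _compare_term(t, z)]
--                 break
--     return essential
-- ===== Notes on version B (the rewrite author's own statement) =====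
-- stated objective: alternative
-- what changed: Phase 1 detects a term's unique cover by streaming with early exit on a second covering implicant instead of accumulating a cover list; phase 2 replaces A's grow-and-rescan over essential by a shrinking worklist of uncovered terms from which every term covered by a newly chosen implicant is removed at once, eliminating all membership/coverage tests against the growing essential list.
import Mathlib
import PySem

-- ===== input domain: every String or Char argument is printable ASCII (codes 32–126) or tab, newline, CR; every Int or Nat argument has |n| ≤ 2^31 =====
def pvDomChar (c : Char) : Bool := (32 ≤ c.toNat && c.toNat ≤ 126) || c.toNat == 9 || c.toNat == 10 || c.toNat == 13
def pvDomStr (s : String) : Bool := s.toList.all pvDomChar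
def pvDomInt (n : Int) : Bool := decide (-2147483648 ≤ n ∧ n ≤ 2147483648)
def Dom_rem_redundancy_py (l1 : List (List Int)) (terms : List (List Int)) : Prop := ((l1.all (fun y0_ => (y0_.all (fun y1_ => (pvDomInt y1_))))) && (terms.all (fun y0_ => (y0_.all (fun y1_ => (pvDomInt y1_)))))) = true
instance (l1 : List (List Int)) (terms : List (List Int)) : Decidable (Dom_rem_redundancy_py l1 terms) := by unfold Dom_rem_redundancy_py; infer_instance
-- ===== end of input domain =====

-- B replaces A's cover-list accumulation by streaming unique-cover detection with
-- early exit, and A's grow-and-rescan second pass by a shrinking worklist of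
-- uncovered terms (alternative decomposition); equivalence is about the return
-- value only (neither program mutates its arguments).

-- ===== PORT A =====
-- shared helper `_compare_term` (identical in Source A and Source B): loop over enumerate(term);
-- `minterm[i]` is PySem.List.pyGet?; the `none` branch is Python's IndexError, excluded by Pre_.
def pyCompareTerm (minterm : List Int) : List Int → Nat → Bool
  | [], _ => true
  | x :: rest, i =>
    if x ≠ 3 then
      match PySem.List.pyGet? minterm (i : Int) with
      | none => false   -- IndexError in Python; inputs reaching this are outside Pre_
      | some m => if x ≠ m then false else pyCompareTerm minterm rest (i + 1)
    else pyCompareTerm minterm rest (i + 1)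

def rem_redundancy_py (l1 : List (List Int)) (terms : List (List Int)) : List (List Int) :=
  let ess1 := terms.foldl (fun essential x =>
    let temporary := l1.foldl (fun t y => if pyCompareTerm x y 0 then t ++ [y] else t) []
    if temporary.length = 1 then
      let t0 := temporary.headD []
      if essential.contains t0 then essential else essential ++ [t0]
    else essential) []
  terms.foldl (fun essential x =>
    if essential.any (fun y => pyCompareTerm x y 0) then essential
    else
      match l1.find? (fun z => pyCompareTerm x z 0) with   -- `for z in l1: … break`
      | some z => if essential.contains z then essential else essential ++ [z]
      | none => essential) ess1

-- ===== PORT B =====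
-- Source B's inner phase-1 loop: `only` starts at None, first cover stores y, a
-- second cover resets to None and breaks.
def findOnly (x : List Int) : List (List Int) → Option (List Int) → Option (List Int)
  | [], only => only
  | y :: rest, only =>
    if pyCompareTerm x y 0 then
      match only with
      | none => findOnly x rest (some y)
      | some _ => none          -- `only = None; break`
    else findOnly x rest only

-- Source B's `while pending:` worklist loop.
def phase2B (l1 : List (List Int)) (pending : List (List Int)) (ess : List (List Int)) : List (List Int) :=
  match pending with
  | [] => ess
  | x :: rest =>
    match l1.find? (fun z => pyCompareTerm x z 0) with
    | some z => phase2B l1 (rest.filter (fun t => !(pyCompareTerm t z 0))) (ess ++ [z])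
    | none => phase2B l1 rest ess
termination_by pending.length
decreasing_by
  · simp only [List.length_unattach]
    exact Nat.lt_succ_of_le (le_trans (List.length_filter_le _ _) (le_of_eq (List.length_attach)))
  · simp

def rem_redundancy_py_alt (l1 : List (List Int)) (terms : List (List Int)) : List (List Int) :=
  let ess1 := terms.foldl (fun essential x =>
    match findOnly x l1 none with
    | some o => if essential.contains o then essential else essential ++ [o]
    | none => essential) []
  phase2B l1 (terms.filter (fun x => !(ess1.any (fun y => pyCompareTerm x y 0)))) ess1

-- ===== PRECONDITION & SPEC =====
-- Pre_ admits exactly the inputs on which Python A returns (no IndexError): whenever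
-- _compare_term(x, y) would read minterm[i] past the end of x (y[i] ≠ 3 at an index
-- i ≥ len(x)), the loop must already have failed at some earlier index j.
def Pre_rem_redundancy_py (l1 : List (List Int)) (terms : List (List Int)) : Prop :=
  ∀ x ∈ terms, ∀ y ∈ l1, ∀ i < y.length, x.length ≤ i → y.getD i 0 ≠ 3 →
    ∃ j < i, y.getD j 0 ≠ 3 ∧ (x.length ≤ j ∨ y.getD j 0 ≠ x.getD j 0)
instance (l1 : List (List Int)) (terms : List (List Int)) : Decidable (Pre_rem_redundancy_py l1 terms) := by unfold Pre_rem_redundancy_py; infer_instance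
def pvWitness_rem_redundancy_py : List (List Int) × List (List Int) := ([[1], [3, 0]], [[1, 0], [0, 0]])
def Spec_rem_redundancy_py (l1 : List (List Int)) (terms : List (List Int)) (out : List (List Int)) : Prop := out = rem_redundancy_py_alt l1 terms
instance (l1 : List (List Int)) (terms : List (List Int)) (out : List (List Int)) : Decidable (Spec_rem_redundancy_py l1 terms out) := by unfold Spec_rem_redundancy_py; infer_instance

-- ===== CLAIM (what is proved, stated in full; the proofs are below) =====
def Claim_equal_rem_redundancy_py : Prop := ∀ (l1 : List (List Int)) (terms : List (List Int)), Dom_rem_redundancy_py l1 terms → Pre_rem_redundancy_py l1 terms → Spec_rem_redundancy_py l1 terms (rem_redundancy_py l1 terms)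

-- ===== LEMMAS AND PROOFS =====

-- `findOnly` carrying an already-found cover: any further cover kills it.
theorem findOnly_some (x a : List Int) (l : List (List Int)) :
    findOnly x l (some a)
      = if l.filter (fun y => pyCompareTerm x y 0) = [] then some a else none := by
  induction l with
  | nil => rfl
  | cons y rest ih =>
    by_cases h : pyCompareTerm x y 0
    · simp [findOnly, h]
    · simp [findOnly, h, ih]

-- `findOnly` from None computes the unique cover iff exactly one exists.
theorem findOnly_none (x : List Int) (l : List (List Int)) :
    findOnly x l none
      = if (l.filter (fun y => pyCompareTerm x y 0)).length = 1
        then some ((l.filter (fun y => pyCompareTerm x y 0)).headD []) else none := by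
  induction l with
  | nil => rfl
  | cons y rest ih =>
    by_cases h : pyCompareTerm x y 0
    · simp only [List.filter_cons, h, if_pos]
      simp only [findOnly, h, if_pos, findOnly_some]
      cases hr : rest.filter (fun y => pyCompareTerm x y 0) <;> simp
    · simp only [List.filter_cons, h, if_false, Bool.false_eq_true]
      simpa [findOnly, h] using ih

-- phase 1 of A equals phase 1 of B.
theorem phase1_eq (l1 : List (List Int)) (terms : List (List Int))
    (ess : List (List Int)) :
    terms.foldl (fun essential x =>
      let temporary := l1.foldl (fun t y => if pyCompareTerm x y 0 then t ++ [y] else t) []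
      if temporary.length = 1 then
        let t0 := temporary.headD []
        if essential.contains t0 then essential else essential ++ [t0]
      else essential) ess
    = terms.foldl (fun essential x =>
        match findOnly x l1 none with
        | some o => if essential.contains o then essential else essential ++ [o]
        | none => essential) ess := by
  apply PySem.List.foldl_congr_mem
  intro e x _
  rw [PySem.List.foldl_append_if_eq_filter, List.nil_append, findOnly_none]
  by_cases h1 : (l1.filter (fun y => pyCompareTerm x y 0)).length = 1 <;> simp [h1]

-- phase 2: A's grow-and-rescan fold equals B's shrinking worklist.
theorem phase2_eq (l1 : List (List Int)) (terms : List (List Int)) :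
    ∀ ess : List (List Int),
    terms.foldl (fun essential x =>
      if essential.any (fun y => pyCompareTerm x y 0) then essential
      else
        match l1.find? (fun z => pyCompareTerm x z 0) with
        | some z => if essential.contains z then essential else essential ++ [z]
        | none => essential) ess
    = phase2B l1 (terms.filter (fun x => !(ess.any (fun y => pyCompareTerm x y 0)))) ess := by
  induction terms with
  | nil => intro ess; simp [phase2B]
  | cons x ts ih =>
    intro ess
    simp only [List.foldl_cons, List.filter_cons]
    by_cases hcov : ess.any (fun y => pyCompareTerm x y 0)
    · simp only [hcov, if_pos, Bool.not_true, Bool.false_eq_true, if_false]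
      exact ih ess
    · simp only [hcov, Bool.false_eq_true, if_false, Bool.not_false, if_pos]
      cases hf : l1.find? (fun z => pyCompareTerm x z 0) with
      | none =>
        rw [phase2B]
        simp only [hf]
        exact ih ess
      | some z =>
        have hz : pyCompareTerm x z 0 = true := by
          have := List.find?_some hf; simpa using this
        have hzess : ¬ ess.contains z = true := by
          intro hc
          exact hcov (List.any_eq_true.mpr
            ⟨z, by simpa [List.contains_eq_mem] using hc, hz⟩)
        rw [phase2B]
        simp only [hf]
        rw [if_neg hzess, ih (ess ++ [z])]
        congr 1
        rw [List.filter_filter]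
        apply List.filter_congr
        intro t _
        simp [List.any_append, Bool.and_comm]
  -- the worklist invariant: a chosen implicant is never already essential, so
  -- A's `z not in essential` test is vacuous and B may drop it.

-- ===== VERDICT (by name: the statement is the Claim_ definition above) =====
theorem rem_redundancy_py_spec : Claim_equal_rem_redundancy_py := by
  intro l1 terms _ _
  unfold Spec_rem_redundancy_py
  show (terms.foldl _ (terms.foldl _ [])) = rem_redundancy_py_alt l1 terms
  unfold rem_redundancy_py_alt
  rw [phase1_eq, phase2_eq]
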